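-- pv_equiv track=rewrite | github.com/ethanvc/evo | logjson/internal/gostd/copy_jsonv2.py | remove_build_tag
-- ===== SOURCE A (Python) =====
-- BUILD_TAG_V2 = "//go:build goexperiment.jsonv2"
--
-- def remove_build_tag(content: str) -> str:
--     lines = content.split("\n")
--     out = []
--     skip_next_blank = False
--     for line in lines:
--         if line.strip() == BUILD_TAG_V2:
--             skip_next_blank = True
--             continue
--         if skip_next_blank and line.strip() == "":
--             skip_next_blank = False
--             continue
--         skip_next_blank = False
--         out.append(line)
--     return "\n".join(out)
-- ===== SOURCE B (Python) =====
-- BUILD_TAG_V2 = "//go:build goexperiment.jsonv2"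
--
-- def remove_build_tag(content: str) -> str:
--     lines = content.split("\n")
--     drop = set()
--     for i, line in enumerate(lines):
--         if line.strip() == BUILD_TAG_V2:
--             drop.add(i)
--             if i + 1 < len(lines) and lines[i + 1].strip() == "":
--                 drop.add(i + 1)
--     return "\n".join(line for j, line in enumerate(lines) if j not in drop)
-- ===== Notes on version B (the rewrite author's own statement) =====
-- stated objective: alternative
-- what changed: Replaced A's stateful single pass with a skip_next_blank flag by two staged passes: a first pass builds a set of line indices to drop (each tag line's index, plus the next index when that line is blank), and a second pass rebuilds the output by filtering lines whose index is in that set.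
import Mathlib
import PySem

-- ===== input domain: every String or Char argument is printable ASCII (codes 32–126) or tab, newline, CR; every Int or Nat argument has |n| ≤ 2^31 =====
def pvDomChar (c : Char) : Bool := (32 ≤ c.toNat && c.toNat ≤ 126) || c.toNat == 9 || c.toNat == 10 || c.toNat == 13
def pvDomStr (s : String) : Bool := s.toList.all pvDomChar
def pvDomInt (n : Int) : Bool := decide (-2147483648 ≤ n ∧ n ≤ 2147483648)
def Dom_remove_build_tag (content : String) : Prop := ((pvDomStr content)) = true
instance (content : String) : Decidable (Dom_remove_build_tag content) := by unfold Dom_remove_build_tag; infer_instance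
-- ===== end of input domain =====

-- B replaces A's stateful single pass (skip_next_blank flag) with two staged passes: first build the
-- set of line indices to drop, then filter the lines by index; objective: alternative decomposition.

def pvBuildTag : String := "//go:build goexperiment.jsonv2"

-- line.strip() == BUILD_TAG_V2  /  line.strip() == ""
def pvTag (l : String) : Bool := PySem.Str.strip l == pvBuildTag
def pvBlank (l : String) : Bool := PySem.Str.strip l == ""

-- ===== PORT A =====
-- A's loop: out accumulates kept lines; skip_next_blank is the boolean state.
def pvLoopA : Bool → List String → List String
  | _, [] => []
  | skip, l :: ls =>
    if pvTag l then pvLoopA true ls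
    else if skip && pvBlank l then pvLoopA false ls
    else l :: pvLoopA false ls

def remove_build_tag (content : String) : String :=
  PySem.Str.join "\n" (pvLoopA false ((PySem.Str.split? content "\n").getD []))

-- ===== PORT B =====
-- body of Source B's first loop: add i (and i+1 when the next line exists and is blank) to the drop set
def pvStep (lines : List String) (s : PySem.Set Int) (p : Int × String) : PySem.Set Int :=
  if pvTag p.2 then
    if decide (p.1 + 1 < (lines.length : Int)) && pvBlank (PySem.List.pyGetD lines (p.1 + 1) "") then
      PySem.Set.add (PySem.Set.add s p.1) (p.1 + 1)
    else PySem.Set.add s p.1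
  else s

def remove_build_tag_alt (content : String) : String :=
  let lines := (PySem.Str.split? content "\n").getD []
  let drop := (PySem.List.enumerate lines).foldl (pvStep lines) PySem.Set.empty
  PySem.Str.join "\n"
    (((PySem.List.enumerate lines).filter (fun p => !(PySem.Set.contains drop p.1))).map (·.2))

-- ===== PRECONDITION & SPEC =====
def Spec_remove_build_tag (content : String) (out : String) : Prop := out = remove_build_tag_alt content
instance (content : String) (out : String) : Decidable (Spec_remove_build_tag content out) := by unfold Spec_remove_build_tag; infer_instance

-- ===== CLAIM (what is proved, stated in full; the proofs are below) =====
def Claim_equal_remove_build_tag : Prop := ∀ (content : String), Dom_remove_build_tag content → Spec_remove_build_tag content (remove_build_tag content)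

-- ===== LEMMAS AND PROOFS =====

-- flag value A carries into an iteration, as a function of the previous line
def pvFlagOf : Option String → Bool
  | none => false
  | some p => pvTag p

-- 'processing pair p put index j into the drop set'
def pvAdds (lines : List String) (p : Int × String) (j : Int) : Prop :=
  pvTag p.2 = true ∧
    (p.1 = j ∨ (p.1 + 1 = j ∧ j < (lines.length : Int) ∧ pvBlank (PySem.List.pyGetD lines j "") = true))

theorem pv_mem_step (lines : List String) (s : PySem.Set Int) (p : Int × String) (j : Int) :
    j ∈ pvStep lines s p ↔ j ∈ s ∨ pvAdds lines p j := by
  unfold pvStep pvAdds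
  by_cases ht : pvTag p.2 = true
  · rw [if_pos ht]
    by_cases hb : (decide (p.1 + 1 < (lines.length : Int)) && pvBlank (PySem.List.pyGetD lines (p.1 + 1) "")) = true
    · rw [if_pos hb]
      simp only [Bool.and_eq_true, decide_eq_true_eq] at hb
      simp only [PySem.Set.mem_add]
      constructor
      · rintro ((h | rfl) | rfl)
        · exact Or.inl h
        · exact Or.inr ⟨ht, Or.inl rfl⟩
        · exact Or.inr ⟨ht, Or.inr ⟨rfl, hb.1, hb.2⟩⟩
      · rintro (h | ⟨-, (rfl | ⟨rfl, -, -⟩)⟩)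
        · exact Or.inl (Or.inl h)
        · exact Or.inl (Or.inr rfl)
        · exact Or.inr rfl
    · rw [if_neg hb]
      simp only [PySem.Set.mem_add]
      constructor
      · rintro (h | rfl)
        · exact Or.inl h
        · exact Or.inr ⟨ht, Or.inl rfl⟩
      · rintro (h | ⟨-, (rfl | ⟨rfl, hn, hbl⟩)⟩)
        · exact Or.inl h
        · exact Or.inr rfl
        · exact absurd (by simp [hn, hbl]) hb
  · rw [if_neg ht]
    constructor
    · exact Or.inl
    · rintro (h | ⟨h, -⟩)
      · exact h
      · exact absurd h ht

theorem pv_mem_foldl (lines : List String) (L : List (Int × String)) :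
    ∀ (s : PySem.Set Int) (j : Int),
      j ∈ L.foldl (pvStep lines) s ↔ j ∈ s ∨ ∃ p ∈ L, pvAdds lines p j := by
  induction L with
  | nil => intro s j; simp
  | cons p L ih =>
    intro s j
    simp only [List.foldl_cons, ih, pv_mem_step, List.mem_cons]
    constructor
    · rintro ((h | h) | ⟨q, hq, h⟩)
      · exact Or.inl h
      · exact Or.inr ⟨p, Or.inl rfl, h⟩
      · exact Or.inr ⟨q, Or.inr hq, h⟩
    · rintro (h | ⟨q, (rfl | hq), h⟩)
      · exact Or.inl (Or.inl h)
      · exact Or.inl (Or.inr h)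
      · exact Or.inr ⟨q, hq, h⟩

theorem pv_contains_drop (lines : List String) (j : Int) :
    PySem.Set.contains ((PySem.List.enumerate lines).foldl (pvStep lines) PySem.Set.empty) j = true ↔
      ∃ k : Nat, k < lines.length ∧ pvAdds lines ((k : Int), PySem.List.pyGetD lines ((k : Int)) "") j := by
  have hm : (PySem.Set.contains ((PySem.List.enumerate lines).foldl (pvStep lines) PySem.Set.empty) j = true) ↔
      j ∈ (PySem.List.enumerate lines).foldl (pvStep lines) PySem.Set.empty := by
    simp [PySem.Set.contains]
  rw [hm, pv_mem_foldl]
  constructor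
  · rintro (h | ⟨p, hp, h⟩)
    · simp [PySem.Set.empty] at h
    · rw [PySem.List.mem_enumerate_iff] at hp
      obtain ⟨k, hk, rfl⟩ := hp
      refine ⟨k, hk, ?_⟩
      have heq : PySem.List.pyGetD lines ((k : Int)) "" = lines[k] := by
        rw [PySem.List.pyGetD_natCast, List.getD_eq_getElem _ _ hk]
      simp only [zero_add] at h
      rw [heq]
      exact h
  · rintro ⟨k, hk, h⟩
    refine Or.inr ⟨((k : Int), lines[k]), ?_, ?_⟩
    · rw [PySem.List.mem_enumerate_iff]
      exact ⟨k, hk, by simp⟩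
    · have heq : PySem.List.pyGetD lines ((k : Int)) "" = lines[k] := by
        rw [PySem.List.pyGetD_natCast, List.getD_eq_getElem _ _ hk]
      rw [← heq]
      exact h

-- the drop-set membership at the head of the suffix, in terms of A's flag
theorem pv_contains_head (pre : List String) (l : String) (ls : List String) :
    (PySem.Set.contains
        ((PySem.List.enumerate (pre ++ l :: ls)).foldl (pvStep (pre ++ l :: ls)) PySem.Set.empty)
        ((pre.length : Int)) = true) ↔
      (pvTag l = true ∨ (pvFlagOf pre.getLast? = true ∧ pvBlank l = true)) := by
  have hlen : (pre ++ l :: ls).length = pre.length + 1 + ls.length := by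
    simp [List.length_append]; omega
  have hget : PySem.List.pyGetD (pre ++ l :: ls) ((pre.length : Int)) "" = l := by
    simp [PySem.List.pyGetD]
  rw [pv_contains_drop]
  constructor
  · rintro ⟨k, hk, ht, (hkj | ⟨hkj, -, hbl⟩)⟩
    · have hkj' : ((k : Int)) = ((pre.length : Int)) := hkj
      have hke : k = pre.length := by exact_mod_cast hkj'
      subst hke
      left
      rwa [hget] at ht
    · have hkj' : ((k : Int)) + 1 = ((pre.length : Int)) := hkj
      have hke : k + 1 = pre.length := by exact_mod_cast hkj'
      have hkpre : k < pre.length := by omega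
      have hgk : PySem.List.pyGetD (pre ++ l :: ls) ((k : Int)) "" = pre[k] := by
        rw [PySem.List.pyGetD_natCast, List.getD_eq_getElem _ _ (by rw [hlen]; omega)]
        exact List.getElem_append_left hkpre
      rw [hgk] at ht
      have hlast : pre.getLast? = some pre[k] := by
        rw [List.getLast?_eq_getElem?, show pre.length - 1 = k from by omega,
          List.getElem?_eq_getElem hkpre]
      right
      constructor
      · rw [hlast]
        exact ht
      · rwa [hget] at hbl
  · rintro (ht | ⟨hf, hb⟩)
    · refine ⟨pre.length, by rw [hlen]; omega, ?_, Or.inl rfl⟩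
      show pvTag (PySem.List.pyGetD (pre ++ l :: ls) ((pre.length : Int)) "") = true
      rwa [hget]
    · match hp : pre.getLast? with
      | none => rw [hp] at hf; simp [pvFlagOf] at hf
      | some p =>
        rw [hp] at hf
        have hne : pre ≠ [] := by intro h; subst h; simp at hp
        have hlp : 0 < pre.length := List.length_pos_iff.mpr hne
        have hkpre : pre.length - 1 < pre.length := by omega
        have hgp : pre[pre.length - 1] = p := by
          have h1 : pre[pre.length - 1]? = some p := by
            rw [← List.getLast?_eq_getElem?]; exact hp
          rw [List.getElem?_eq_getElem hkpre] at h1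
          exact Option.some.inj h1
        refine ⟨pre.length - 1, by rw [hlen]; omega, ?_, ?_⟩
        · show pvTag (PySem.List.pyGetD (pre ++ l :: ls) (((pre.length - 1 : Nat) : Int)) "") = true
          have hgk : PySem.List.pyGetD (pre ++ l :: ls) (((pre.length - 1 : Nat) : Int)) "" = pre[pre.length - 1] := by
            rw [PySem.List.pyGetD_natCast, List.getD_eq_getElem _ _ (by rw [hlen]; omega)]
            exact List.getElem_append_left hkpre
          rw [hgk, hgp]
          exact hf
        · refine Or.inr ⟨?_, ?_, ?_⟩
          · show (((pre.length - 1 : Nat) : Int)) + 1 = ((pre.length : Int))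
            omega
          · show ((pre.length : Int)) < (((pre ++ l :: ls).length : Nat) : Int)
            rw [hlen]; push_cast; omega
          · show pvBlank (PySem.List.pyGetD (pre ++ l :: ls) ((pre.length : Int)) "") = true
            rw [hget]; exact hb

theorem pv_main (lines : List String) :
    ∀ (suf pre : List String), lines = pre ++ suf →
      (((PySem.List.enumerate suf ((pre.length : Int))).filter
          (fun p => !(PySem.Set.contains ((PySem.List.enumerate lines).foldl (pvStep lines) PySem.Set.empty) p.1))).map (·.2))
        = pvLoopA (pvFlagOf pre.getLast?) suf := by
  intro suf
  induction suf with
  | nil => intro pre _; simp [pvLoopA]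
  | cons l ls ih =>
    intro pre hpre
    have hc := pv_contains_head pre l ls
    rw [← hpre] at hc
    have ihl := ih (pre ++ [l]) (by simp [hpre])
    rw [List.getLast?_concat] at ihl
    have hcastlen : (((pre ++ [l]).length : Nat) : Int) = (pre.length : Int) + 1 := by simp
    rw [hcastlen, show pvFlagOf (some l) = pvTag l from rfl] at ihl
    rw [PySem.List.enumerate_cons, List.filter_cons]
    by_cases ht : pvTag l = true
    · have hcc : PySem.Set.contains ((PySem.List.enumerate lines).foldl (pvStep lines) PySem.Set.empty) ((pre.length : Int)) = true :=
        hc.mpr (Or.inl ht)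
      simp only [hcc, Bool.not_true]
      rw [if_neg Bool.false_ne_true, ihl]
      simp [pvLoopA, ht]
    · have ht' : pvTag l = false := Bool.eq_false_iff.mpr ht
      by_cases hb : (pvFlagOf pre.getLast? && pvBlank l) = true
      · simp only [Bool.and_eq_true] at hb
        have hcc : PySem.Set.contains ((PySem.List.enumerate lines).foldl (pvStep lines) PySem.Set.empty) ((pre.length : Int)) = true :=
          hc.mpr (Or.inr hb)
        simp only [hcc, Bool.not_true]
        rw [if_neg Bool.false_ne_true, ihl]
        simp [pvLoopA, ht', hb.1, hb.2]
      · have hbf : (pvFlagOf pre.getLast? && pvBlank l) = false := Bool.eq_false_iff.mpr hb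
        have hcf : PySem.Set.contains ((PySem.List.enumerate lines).foldl (pvStep lines) PySem.Set.empty) ((pre.length : Int)) = false := by
          rw [Bool.eq_false_iff]
          intro h
          rcases hc.mp h with h' | h'
          · exact ht h'
          · exact hb (by simp [h'.1, h'.2])
        simp only [hcf, Bool.not_false]
        rw [if_pos trivial, List.map_cons, ihl]
        simp [pvLoopA, ht', hbf]

-- ===== VERDICT (by name: the statement is the Claim_ definition above) =====
theorem remove_build_tag_spec : Claim_equal_remove_build_tag := by
  intro content _
  simp only [Spec_remove_build_tag, remove_build_tag, remove_build_tag_alt]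
  have h := pv_main ((PySem.Str.split? content "\n").getD [])
    ((PySem.Str.split? content "\n").getD []) [] (by simp)
  simp only [List.length_nil, Nat.cast_zero, List.getLast?_nil, pvFlagOf] at h
  rw [h]
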